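-- pv_equiv track=rewrite | github.com/ToderitaLoredana/AA | Lab2/sorting_lab.py | _gen_sift_down
-- ===== SOURCE A (Python) =====
-- def _gen_sift_down(arr, n, i):
--     while True:
--         largest = i
--         l = 2 * i + 1
--         r = 2 * i + 2
--         if l < n and arr[l] > arr[largest]:
--             largest = l
--         if r < n and arr[r] > arr[largest]:
--             largest = r
--         if largest == i:
--             break
--         arr[i], arr[largest] = arr[largest], arr[i]
--         yield arr.copy(), i, largest
--         i = largest
-- ===== SOURCE B (Python) =====
-- def _gen_sift_down(arr, n, i):
--     # Phase 1: compute the descent path purely (no mutation). The value being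
--     # sifted down stays at the current node after each swap, so comparisons
--     # only need the fixed value v and untouched child entries of arr.
--     path = []
--     if 2 * i + 1 < n:
--         v = arr[i]
--         j = i
--         while 2 * j + 1 < n:
--             l = 2 * j + 1
--             r = 2 * j + 2
--             big, bigv = j, v
--             if arr[l] > bigv:
--                 big, bigv = l, arr[l]
--             if r < n and arr[r] > bigv:
--                 big, bigv = r, arr[r]
--             if big == j:
--                 break
--             path.append((j, big))
--             j = big
--     # Phase 2: replay the path, mutating arr and emitting the states.
--     for p, c in path:
--         arr[p], arr[c] = arr[c], arr[p]
--         yield arr.copy(), p, c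
-- ===== Notes on version B (the rewrite author's own statement) =====
-- stated objective: alternative
-- what changed: B splits A's mutate-as-you-go while-loop generator into two staged passes: it first computes the descent path of (parent, child) index pairs purely, without mutating the array (the sifted value stays at the current node after each swap, so the path is determined by that one value and untouched child entries), and then replays the path, performing the swaps and yielding the states.
-- outside the precondition, e.g. on _gen_sift_down([5, 1], 2, -1): A returns [([1, 5], -1, 0), ([5, 1], 0, 1)], B returns [([1, 5], -1, 0)]; on _gen_sift_down([1, 2, 3], 5, 0): A returns [([3, 2, 1], 0, 2)], B returns [([3, 2, 1], 0, 2)]; on _gen_sift_down([1, 2, 3], 3, -2): A returns [], B returns []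
import Mathlib
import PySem

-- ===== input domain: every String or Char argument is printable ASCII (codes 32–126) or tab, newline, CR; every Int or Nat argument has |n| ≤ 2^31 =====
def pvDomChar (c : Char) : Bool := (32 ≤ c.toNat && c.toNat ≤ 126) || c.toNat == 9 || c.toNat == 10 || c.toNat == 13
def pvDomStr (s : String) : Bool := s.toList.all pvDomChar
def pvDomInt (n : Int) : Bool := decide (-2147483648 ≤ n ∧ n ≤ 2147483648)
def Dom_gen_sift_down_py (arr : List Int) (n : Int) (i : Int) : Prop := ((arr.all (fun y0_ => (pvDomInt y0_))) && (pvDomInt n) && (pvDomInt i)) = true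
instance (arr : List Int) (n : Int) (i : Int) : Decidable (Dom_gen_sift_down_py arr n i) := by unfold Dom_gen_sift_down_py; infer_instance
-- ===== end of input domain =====

-- B replaces A's mutate-as-you-go loop generator by two staged passes: it first computes the descent PATH of
-- index pairs purely (the sifted value stays at the current node after every swap, so no mutation is needed to
-- decide the path), then replays the path, swapping and emitting the states; same cost, different decomposition.
-- Both A and B mutate `arr` in place identically; the equivalence proved here is about the yielded sequence.

-- ===== PORT A =====
-- One pass of the while body; fuel only makes the Lean recursion total (the Python loop terminates on Pre_).
def pvALoop : Nat → List Int → Int → Int → List (List Int × Int × Int) → List (List Int × Int × Int)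
  | 0, _, _, _, acc => acc
  | fuel+1, arr, n, i, acc =>
    let largest := i
    let l := 2*i + 1
    let r := 2*i + 2
    let largest := if l < n ∧ PySem.List.pyGetD arr l 0 > PySem.List.pyGetD arr largest 0 then l else largest
    let largest := if r < n ∧ PySem.List.pyGetD arr r 0 > PySem.List.pyGetD arr largest 0 then r else largest
    if largest = i then acc
    else
      let ai := PySem.List.pyGetD arr i 0
      let al := PySem.List.pyGetD arr largest 0
      let arr' := PySem.List.pySetD (PySem.List.pySetD arr i al) largest ai
      pvALoop fuel arr' n largest (acc ++ [(arr', i, largest)])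

def gen_sift_down_py (arr : List Int) (n : Int) (i : Int) : List (List Int × Int × Int) :=
  pvALoop (arr.length + 1) arr n i []

-- ===== PORT B =====
-- Phase 1 of Source B: the pure descent path; v is the sifted value arr[i] (fuel only makes the recursion total).
def pvBPath : Nat → List Int → Int → Int → Int → List (Int × Int)
  | 0, _, _, _, _ => []
  | fuel+1, arr, n, j, v =>
    if 2*j + 1 < n then
      let l := 2*j + 1
      let r := 2*j + 2
      let big := if PySem.List.pyGetD arr l 0 > v then l else j
      let bigv := if PySem.List.pyGetD arr l 0 > v then PySem.List.pyGetD arr l 0 else v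
      let big2 := if r < n ∧ PySem.List.pyGetD arr r 0 > bigv then r else big
      if big2 = j then [] else (j, big2) :: pvBPath fuel arr n big2 v
    else []

-- Phase 2 of Source B: replay the path, swapping and emitting states.
def pvBEmit : List Int → List (Int × Int) → List (List Int × Int × Int)
  | _, [] => []
  | arr, (p, c) :: rest =>
    let ap := PySem.List.pyGetD arr p 0
    let ac := PySem.List.pyGetD arr c 0
    let arr' := PySem.List.pySetD (PySem.List.pySetD arr p ac) c ap
    (arr', p, c) :: pvBEmit arr' rest

def gen_sift_down_py_alt (arr : List Int) (n : Int) (i : Int) : List (List Int × Int × Int) :=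
  let path :=
    if 2*i + 1 < n then pvBPath (arr.length + 1) arr n i (PySem.List.pyGetD arr i 0) else []
  pvBEmit arr path

-- ===== PRECONDITION & SPEC =====
-- Pre_ restricts to the natural heap domain: 0 ≤ i, and n ≤ len(arr) unless node i has no child below n at all
-- (then nothing is read and A trivially yields nothing). Outside it A may raise IndexError, and where it still
-- returns it does so either via Python's negative-index wraparound on i < 0 (not a heap position, an
-- implementation artefact B does not reproduce) or, for n > len(arr), with values B matches anyway.
def Pre_gen_sift_down_py (arr : List Int) (n : Int) (i : Int) : Prop :=
  0 ≤ i ∧ (n ≤ (arr.length : Int) ∨ n ≤ 2*i + 1)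
instance (arr : List Int) (n : Int) (i : Int) : Decidable (Pre_gen_sift_down_py arr n i) := by
  unfold Pre_gen_sift_down_py; infer_instance

def pvWitness_gen_sift_down_py : List Int × Int × Int := ([1, 3, 2], 3, 0)

def Spec_gen_sift_down_py (arr : List Int) (n : Int) (i : Int) (out : List (List Int × Int × Int)) : Prop := out = gen_sift_down_py_alt arr n i
instance (arr : List Int) (n : Int) (i : Int) (out : List (List Int × Int × Int)) : Decidable (Spec_gen_sift_down_py arr n i out) := by unfold Spec_gen_sift_down_py; infer_instance

-- ===== CLAIM (what is proved, stated in full; the proofs are below) =====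
def Claim_equal_gen_sift_down_py : Prop := ∀ (arr : List Int) (n : Int) (i : Int), Dom_gen_sift_down_py arr n i → Pre_gen_sift_down_py arr n i → Spec_gen_sift_down_py arr n i (gen_sift_down_py arr n i)

-- ===== LEMMAS AND PROOFS =====

-- Reading an index strictly above a written one is unaffected by the write.
theorem pyGetD_pySetD_above (xs : List Int) (p k x : Int) (hp : 0 ≤ p) (hk : p < k) :
    PySem.List.pyGetD (PySem.List.pySetD xs p x) k 0 = PySem.List.pyGetD xs k 0 := by
  rw [PySem.List.pySetD_of_nonneg _ _ hp,
      PySem.List.pyGetD_of_nonneg _ _ (by omega : (0:Int) ≤ k),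
      PySem.List.pyGetD_of_nonneg _ _ (by omega : (0:Int) ≤ k)]
  have h : p.toNat ≠ k.toNat := by omega
  simp [List.getD, List.getElem?_set_ne h]

-- Reading back a written in-range index.
theorem pyGetD_pySetD_self (xs : List Int) (p x : Int) (hp : 0 ≤ p) (hlen : p < (xs.length : Int)) :
    PySem.List.pyGetD (PySem.List.pySetD xs p x) p 0 = x := by
  rw [PySem.List.pySetD_of_nonneg _ _ hp, PySem.List.pyGetD_of_nonneg _ _ hp]
  have h : p.toNat < xs.length := by omega
  simp [List.getD, h]

-- pvBPath only reads indices strictly above its node, so it is stable under writes at or below the node.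
theorem pvBPath_stable (fuel : Nat) : ∀ (a b : List Int) (n j v : Int), 0 ≤ j →
    (∀ k : Int, j < k → PySem.List.pyGetD a k 0 = PySem.List.pyGetD b k 0) →
    pvBPath fuel a n j v = pvBPath fuel b n j v := by
  induction fuel with
  | zero => intro a b n j v _ _; rfl
  | succ fuel ih =>
    intro a b n j v hj hagree
    simp only [pvBPath]
    by_cases hl : 2*j + 1 < n
    · have el : PySem.List.pyGetD a (2*j+1) 0 = PySem.List.pyGetD b (2*j+1) 0 :=
        hagree _ (by omega)
      have er : PySem.List.pyGetD a (2*j+2) 0 = PySem.List.pyGetD b (2*j+2) 0 :=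
        hagree _ (by omega)
      rw [if_pos hl, if_pos hl, el, er]
      by_cases h1 : PySem.List.pyGetD b (2*j+1) 0 > v
      all_goals simp only [h1, ite_true, ite_false]
      all_goals split_ifs with h2 h3
      all_goals first
        | rfl
        | (rw [ih a b n _ v (by omega) (fun k hk => hagree k (by omega))])
    · rw [if_neg hl, if_neg hl]

-- The recursive branch of the step: swap at (j, big2), then use the induction hypothesis,
-- the read-back of the sifted value, and path stability under the swap.
theorem pvStep (fuel : Nat)
    (ih : ∀ (arr : List Int) (n j : Int) (acc : List (List Int × Int × Int)),
      0 ≤ j → n ≤ (arr.length : Int) →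
      pvALoop fuel arr n j acc
        = acc ++ pvBEmit arr (pvBPath fuel arr n j (PySem.List.pyGetD arr j 0)))
    (arr : List Int) (n j big2 : Int) (acc : List (List Int × Int × Int))
    (hj : 0 ≤ j) (hb : j < big2) (hbn : big2 < n) (hn : n ≤ (arr.length : Int)) :
    pvALoop fuel
        (PySem.List.pySetD (PySem.List.pySetD arr j (PySem.List.pyGetD arr big2 0)) big2
          (PySem.List.pyGetD arr j 0)) n big2
        (acc ++ [(PySem.List.pySetD (PySem.List.pySetD arr j (PySem.List.pyGetD arr big2 0)) big2
          (PySem.List.pyGetD arr j 0), j, big2)])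
      = acc ++ pvBEmit arr ((j, big2) :: pvBPath fuel arr n big2 (PySem.List.pyGetD arr j 0)) := by
  set arr' := PySem.List.pySetD (PySem.List.pySetD arr j (PySem.List.pyGetD arr big2 0)) big2
    (PySem.List.pyGetD arr j 0) with harr'
  have hlen : (arr'.length : Int) = (arr.length : Int) := by
    simp [harr', PySem.List.length_pySetD]
  have hv : PySem.List.pyGetD arr' big2 0 = PySem.List.pyGetD arr j 0 := by
    rw [harr']
    exact pyGetD_pySetD_self _ big2 _ (by omega) (by rw [PySem.List.length_pySetD]; omega)
  have hst : pvBPath fuel arr' n big2 (PySem.List.pyGetD arr j 0)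
      = pvBPath fuel arr n big2 (PySem.List.pyGetD arr j 0) := by
    refine pvBPath_stable fuel arr' arr n big2 _ (by omega) (fun k hk => ?_)
    rw [harr', pyGetD_pySetD_above _ big2 k _ (by omega) hk,
        pyGetD_pySetD_above _ j k _ hj (by omega)]
  rw [ih arr' n big2 _ (by omega) (by omega), hv, hst]
  simp only [pvBEmit, ← harr']
  simp

-- Main invariant: A's accumulating loop on the current array equals acc ++ replaying the pure path.
theorem pvALoop_eq (fuel : Nat) : ∀ (arr : List Int) (n j : Int) (acc : List (List Int × Int × Int)),
    0 ≤ j → n ≤ (arr.length : Int) →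
    pvALoop fuel arr n j acc
      = acc ++ pvBEmit arr (pvBPath fuel arr n j (PySem.List.pyGetD arr j 0)) := by
  induction fuel with
  | zero => intro arr n j acc _ _; simp [pvALoop, pvBPath, pvBEmit]
  | succ fuel ih =>
    intro arr n j acc hj hn
    simp only [pvALoop, pvBPath]
    by_cases hl : 2*j + 1 < n
    · simp only [hl, true_and, if_true]
      by_cases h1 : PySem.List.pyGetD arr (2*j+1) 0 > PySem.List.pyGetD arr j 0
      · simp only [h1, if_true]
        by_cases h2 : 2*j + 2 < n ∧ PySem.List.pyGetD arr (2*j+2) 0 > PySem.List.pyGetD arr (2*j+1) 0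
        · simp only [h2, and_self, if_true]
          rw [if_neg (by omega : ¬(2*j+2 = j)), if_neg (by omega : ¬(2*j+2 = j))]
          exact pvStep fuel ih arr n j (2*j+2) acc hj (by omega) h2.1 hn
        · simp only [h2, if_false]
          rw [if_neg (by omega : ¬(2*j+1 = j)), if_neg (by omega : ¬(2*j+1 = j))]
          exact pvStep fuel ih arr n j (2*j+1) acc hj (by omega) hl hn
      · simp only [h1, if_false]
        by_cases h2 : 2*j + 2 < n ∧ PySem.List.pyGetD arr (2*j+2) 0 > PySem.List.pyGetD arr j 0
        · simp only [h2, and_self, if_true]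
          rw [if_neg (by omega : ¬(2*j+2 = j)), if_neg (by omega : ¬(2*j+2 = j))]
          exact pvStep fuel ih arr n j (2*j+2) acc hj (by omega) h2.1 hn
        · simp only [h2, if_false]
          simp [pvBEmit]
    · have c1 : ¬(2*j + 1 < n ∧ PySem.List.pyGetD arr (2*j+1) 0 > PySem.List.pyGetD arr j 0) :=
        fun h => hl h.1
      have c2 : ¬(2*j + 2 < n ∧ PySem.List.pyGetD arr (2*j+2) 0 > PySem.List.pyGetD arr j 0) :=
        fun h => absurd h.1 (by omega)
      rw [if_neg c1, if_neg c2, if_pos rfl, if_neg hl]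
      simp [pvBEmit]

-- ===== VERDICT (by name: the statement is the Claim_ definition above) =====
theorem gen_sift_down_py_spec : Claim_equal_gen_sift_down_py := by
  intro arr n i _ hpre
  obtain ⟨hi, hcase⟩ := hpre
  unfold Spec_gen_sift_down_py gen_sift_down_py gen_sift_down_py_alt
  rcases hcase with hn | hbig
  · rw [pvALoop_eq (arr.length + 1) arr n i [] hi hn]
    by_cases hg : 2*i + 1 < n
    · simp [hg]
    · simp [hg, pvBPath]
  · have hg : ¬(2*i + 1 < n) := by omega
    have c1 : ¬(2*i + 1 < n ∧ PySem.List.pyGetD arr (2*i+1) 0 > PySem.List.pyGetD arr i 0) :=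
      fun h => hg h.1
    have c2 : ¬(2*i + 2 < n ∧ PySem.List.pyGetD arr (2*i+2) 0 > PySem.List.pyGetD arr i 0) :=
      fun h => absurd h.1 (by omega)
    simp only [pvALoop]
    rw [if_neg c1, if_neg c2, if_pos rfl, if_neg hg]
    simp [pvBEmit]
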